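-- pv_equiv track=rewrite | github.com/maxipdev/Introduccion-a-la-programacion-1-UBA | python/clases de repaso/clase_repaso.py | racha_mas_larga
-- ===== SOURCE A (Python) =====
-- def racha_mas_larga(tiempos: list[int]) -> tuple[int, int]:
--     valores_parciales = []
--     racha = 0
--     posicion = 0
--     actualizar_posicion = False
--
--     for i in range(len(tiempos)):
--         if 1 <= tiempos[i] <= 60:
--             # en caso de que la racha sea 1, esto es pq se actualizo, le agrego la posicion correcta
--             if actualizar_posicion :
--                 posicion = i
--                 actualizar_posicion = False # una vez q la actualiza se desactiva
--             racha += 1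
--         else :
--             #guardo los valores previos:
--             if racha > 0:
--                 valores_parciales.append({"racha": racha, "posicion_inicial": posicion, "posicion_final": i -1})  # se pone el -1 pq se buisca la posicion anterior
--             # reinicio los valores:
--             racha = 0
--             posicion = 0
--             actualizar_posicion = True
--     # guardo el ultimo elemento:
--     if racha > 0 :
--         valores_parciales.append({"racha": racha, "posicion_inicial": posicion, "posicion_final": len(tiempos) - 1})
--
--     #comparo cual tiene una mayor racha
--     mejor_racha = 0
--     inicial = 0
--     final = 0
--     for i in valores_parciales:
--         if i["racha"] > mejor_racha:
--             inicial = i["posicion_inicial"]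
--             final = i["posicion_final"]
--             mejor_racha = i["racha"]
--     return (inicial, final)
-- ===== SOURCE B (Python) =====
-- def racha_mas_larga(tiempos: list[int]) -> tuple[int, int]:
--     best = 0
--     inicial = 0
--     final = 0
--     run_len = 0
--     run_start = 0
--     for i, t in enumerate(tiempos):
--         if 1 <= t <= 60:
--             if run_len == 0:
--                 run_start = i
--             run_len += 1
--             if run_len > best:
--                 best = run_len
--                 inicial = run_start
--                 final = i
--         else:
--             run_len = 0
--     return (inicial, final)
-- ===== Notes on version B (the rewrite author's own statement) =====
-- stated objective: simpler
-- what changed: Replaces A's two-phase design (first loop building a list of run records, second loop selecting the longest) with a single pass that maintains the current run and the best (length, start, end) inline, using strict '>' so the first maximal run wins as in A.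
import Mathlib
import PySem

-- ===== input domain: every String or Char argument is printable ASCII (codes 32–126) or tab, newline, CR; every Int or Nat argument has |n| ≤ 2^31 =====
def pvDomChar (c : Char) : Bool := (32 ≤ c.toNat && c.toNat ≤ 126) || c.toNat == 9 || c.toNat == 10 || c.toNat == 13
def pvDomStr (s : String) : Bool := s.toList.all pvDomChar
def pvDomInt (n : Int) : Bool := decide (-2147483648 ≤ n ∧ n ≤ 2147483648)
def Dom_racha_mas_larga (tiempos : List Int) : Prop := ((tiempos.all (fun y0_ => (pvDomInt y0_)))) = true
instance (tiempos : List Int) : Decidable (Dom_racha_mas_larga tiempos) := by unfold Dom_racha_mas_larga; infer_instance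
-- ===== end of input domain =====

-- B replaces A's two loops (record every run, then select the longest) with one pass
-- keeping the current run and the best (length, start, end) inline; objective: simpler.

-- ===== PORT A =====
-- body of A's first loop; the dict {"racha": r, "posicion_inicial": p, "posicion_final": f}
-- has fixed string keys and is represented as the triple (r, p, f)
def rachaStepA (st : List (Int × Int × Int) × Int × Int × Bool) (p : Int × Int) :
    List (Int × Int × Int) × Int × Int × Bool :=
  let (vp, racha, posicion, act) := st
  if 1 ≤ p.2 ∧ p.2 ≤ 60 then
    (vp, racha + 1, if act then p.1 else posicion, false)
  else
    ((if racha > 0 then vp ++ [(racha, posicion, p.1 - 1)] else vp), 0, 0, true)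

-- body of A's second loop; acc = (mejor_racha, inicial, final)
def rachaSelStep (acc : Int × Int × Int) (r : Int × Int × Int) : Int × Int × Int :=
  if r.1 > acc.1 then r else acc

def racha_mas_larga (tiempos : List Int) : Int × Int :=
  -- for i in range(len(tiempos)): … tiempos[i] …  (i is always in range, so pyGetD is exact)
  let s := (PySem.List.pyRange 0 (PySem.List.len tiempos) 1).foldl
    (fun st i => rachaStepA st (i, PySem.List.pyGetD tiempos i 0)) ([], 0, 0, false)
  let vp := if s.2.1 > 0 then s.1 ++ [(s.2.1, s.2.2.1, PySem.List.len tiempos - 1)] else s.1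
  let r := vp.foldl rachaSelStep (0, 0, 0)
  (r.2.1, r.2.2)

-- ===== PORT B =====
-- state = (best, inicial, final, run_len, run_start)
def rachaStepB (st : Int × Int × Int × Int × Int) (p : Int × Int) :
    Int × Int × Int × Int × Int :=
  let (best, ini, fin, rl, rs) := st
  if 1 ≤ p.2 ∧ p.2 ≤ 60 then
    let rs' := if rl = 0 then p.1 else rs
    let rl' := rl + 1
    if rl' > best then (rl', rs', p.1, rl', rs') else (best, ini, fin, rl', rs')
  else
    (best, ini, fin, 0, rs)

def racha_mas_larga_alt (tiempos : List Int) : Int × Int :=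
  let s := (PySem.List.enumerate tiempos 0).foldl rachaStepB (0, 0, 0, 0, 0)
  (s.2.1, s.2.2.1)

-- ===== PRECONDITION & SPEC =====
def Spec_racha_mas_larga (tiempos : List Int) (out : Int × Int) : Prop := out = racha_mas_larga_alt tiempos
instance (tiempos : List Int) (out : Int × Int) : Decidable (Spec_racha_mas_larga tiempos out) := by unfold Spec_racha_mas_larga; infer_instance

-- ===== CLAIM (what is proved, stated in full; the proofs are below) =====
def Claim_equal_racha_mas_larga : Prop := ∀ (tiempos : List Int), Dom_racha_mas_larga tiempos → Spec_racha_mas_larga tiempos (racha_mas_larga tiempos)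

-- ===== LEMMAS AND PROOFS =====

-- joint invariant of the two loops, by induction on the remaining suffix
lemma racha_loop_inv (xs : List Int) : ∀ (k : Int)
    (vp : List (Int × Int × Int)) (racha pos : Int) (act : Bool)
    (best ini fin rs : Int),
    0 ≤ racha →
    (0 < racha → act = false ∧ pos = rs) →
    (racha = 0 → act = true ∨ pos = k) →
    (best, ini, fin) =
      (vp ++ (if 0 < racha then [(racha, pos, k - 1)] else [])).foldl rachaSelStep (0, 0, 0) →
    (let sA := (PySem.List.enumerate xs k).foldl rachaStepA (vp, racha, pos, act)
     let sB := (PySem.List.enumerate xs k).foldl rachaStepB (best, ini, fin, racha, rs)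
     (sA.1 ++ (if 0 < sA.2.1 then [(sA.2.1, sA.2.2.1, k + (xs.length : Int) - 1)] else [])).foldl
        rachaSelStep (0, 0, 0) = (sB.1, sB.2.1, sB.2.2.1)) := by
  induction xs with
  | nil =>
    intro k vp racha pos act best ini fin rs _ _ _ hb
    simpa [PySem.List.enumerate] using hb.symm
  | cons x xs ih =>
    intro k vp racha pos act best ini fin rs hr hpos hpos0 hb
    simp only [PySem.List.enumerate_cons]
    by_cases hx : 1 ≤ x ∧ x ≤ 60
    · by_cases hz : racha = 0
      · subst hz
        have hpk : (if act then k else pos) = k := by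
          rcases hpos0 rfl with h | h
          · simp [h]
          · simp [h]
        have hb' : (best, ini, fin) = vp.foldl rachaSelStep (0, 0, 0) := by simpa using hb
        simp only [List.foldl_cons, rachaStepA, rachaStepB, hx, if_true, and_self, hpk]
        have harith : k + ((xs.length : Int) + 1) - 1 = k + 1 + (xs.length : Int) - 1 := by ring
        by_cases hbig : (0 : Int) + 1 > best
        · simp only [if_pos hbig]
          have := ih (k + 1) vp 1 k false 1 k k k (by omega)
            (fun _ => ⟨rfl, rfl⟩) (by omega)
            (by rw [List.foldl_append]
                simp only [add_sub_cancel_right]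
                rw [← hb']
                simp [rachaSelStep, show (1 : Int) > best by omega])
          simpa [harith] using this
        · simp only [if_neg hbig]
          have := ih (k + 1) vp 1 k false best ini fin k (by omega)
            (fun _ => ⟨rfl, rfl⟩) (by omega)
            (by rw [List.foldl_append]
                simp only [add_sub_cancel_right]
                rw [← hb']
                simp [rachaSelStep, show ¬ ((1 : Int) > best) by omega])
          simpa [harith] using this
      · have hrpos : 0 < racha := by omega
        obtain ⟨hact, hposr⟩ := hpos hrpos
        subst hact
        have hb' : (best, ini, fin) =
            rachaSelStep (vp.foldl rachaSelStep (0, 0, 0)) (racha, pos, k - 1) := by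
          simpa [List.foldl_append, if_pos hrpos] using hb
        simp only [List.foldl_cons, rachaStepA, rachaStepB, hx, and_self, if_true,
          if_neg hz, Bool.false_eq_true, if_false]
        have harith : k + ((xs.length : Int) + 1) - 1 = k + 1 + (xs.length : Int) - 1 := by ring
        set m := vp.foldl rachaSelStep (0, 0, 0) with hm
        have hbest : best = if racha > m.1 then racha else m.1 := by
          simpa [rachaSelStep, apply_ite (Prod.fst)] using congrArg Prod.fst hb'
        have hgoalb : (if racha + 1 > best then ((racha+1 : Int), rs, k) else (best, ini, fin)) =
            rachaSelStep m (racha + 1, pos, k) := by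
          rw [hb', hbest]
          simp only [rachaSelStep, hposr]
          by_cases hc : racha > m.1
          · simp [hc, show racha + 1 > racha by omega, show racha + 1 > m.1 by omega]
          · simp [hc]
        by_cases hbig : racha + 1 > best
        · simp only [if_pos hbig]
          have := ih (k + 1) vp (racha + 1) pos false (racha + 1) rs k rs (by omega)
            (fun _ => ⟨rfl, hposr⟩) (by omega)
            (by rw [List.foldl_append]
                simp only [if_pos (show (0:Int) < racha + 1 by omega), List.foldl_cons,
                  List.foldl_nil, add_sub_cancel_right]
                rw [← hm, ← hgoalb]
                simp [hbig])
          simpa [harith] using this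
        · simp only [if_neg hbig]
          have := ih (k + 1) vp (racha + 1) pos false best ini fin rs (by omega)
            (fun _ => ⟨rfl, hposr⟩) (by omega)
            (by rw [List.foldl_append]
                simp only [if_pos (show (0:Int) < racha + 1 by omega), List.foldl_cons,
                  List.foldl_nil, add_sub_cancel_right]
                rw [← hm, ← hgoalb]
                simp [hbig])
          simpa [harith] using this
    · -- out-of-range value: A closes the run, B resets run_len
      simp only [List.foldl_cons, rachaStepA, rachaStepB, hx, if_false]
      have hvp' : (best, ini, fin) =
          ((if racha > 0 then vp ++ [(racha, pos, k - 1)] else vp)).foldl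
            rachaSelStep (0, 0, 0) := by
        by_cases h : 0 < racha
        · simpa [if_pos h, show racha > 0 from h] using hb
        · have h0 : racha = 0 := by omega
          simpa [h0] using hb
      have := ih (k + 1) (if racha > 0 then vp ++ [(racha, pos, k - 1)] else vp)
        0 0 true best ini fin rs (by omega) (by omega) (fun _ => Or.inl rfl)
        (by simpa using hvp')
      have harith : k + ((xs.length : Int) + 1) - 1 = k + 1 + (xs.length : Int) - 1 := by ring
      simpa [harith] using this

-- A's index loop over range(len) reading tiempos[i] is the fold over enumerate
lemma racha_foldA_enumerate (tiempos : List Int) :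
    (PySem.List.pyRange 0 (PySem.List.len tiempos) 1).foldl
      (fun st i => rachaStepA st (i, PySem.List.pyGetD tiempos i 0)) ([], 0, 0, false)
    = (PySem.List.enumerate tiempos 0).foldl rachaStepA ([], 0, 0, false) := by
  rw [PySem.List.enumerate_eq_map_pyRange tiempos 0, List.foldl_map]

-- ===== VERDICT (by name: the statement is the Claim_ definition above) =====
theorem racha_mas_larga_spec : Claim_equal_racha_mas_larga := by
  intro tiempos _
  show _ = _
  unfold racha_mas_larga racha_mas_larga_alt
  rw [racha_foldA_enumerate]
  have h := racha_loop_inv tiempos 0 [] 0 0 false 0 0 0 0 le_rfl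
    (by omega) (fun _ => Or.inr rfl) (by simp)
  simp only at h
  set sA := (PySem.List.enumerate tiempos 0).foldl rachaStepA ([], 0, 0, false) with hsA
  set sB := (PySem.List.enumerate tiempos 0).foldl rachaStepB (0, 0, 0, 0, 0) with hsB
  simp only [PySem.List.len_eq, zero_add] at h ⊢
  rw [show (if sA.2.1 > 0 then sA.1 ++ [(sA.2.1, sA.2.2.1, (tiempos.length : Int) - 1)] else sA.1)
      = sA.1 ++ (if 0 < sA.2.1 then [(sA.2.1, sA.2.2.1, (tiempos.length : Int) - 1)] else [])
      from by split <;> simp_all]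
  rw [h]
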